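-- pv_equiv track=rewrite | github.com/makarimal10/Reinforcement-Learning | env_implementation.py | reward1
-- ===== SOURCE A (Python) =====
-- def reward1(state):
--     reward = 0
--
--     for i in state:
--         if i == 1:
--             reward += 5 * -3
--         elif i == 2:
--             reward += 5 * -1
--         elif i == 3:
--             reward += 0
--     return reward
-- ===== SOURCE B (Python) =====
-- def reward1(state):
--     return -15 * state.count(1) - 5 * state.count(2)
-- ===== Notes on version B (the rewrite author's own statement) =====
-- stated objective: simpler
-- what changed: Replaces the element-by-element branching accumulation loop with two aggregate counts combined in one closed arithmetic expression (-15*count(1) - 5*count(2)).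
import Mathlib
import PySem

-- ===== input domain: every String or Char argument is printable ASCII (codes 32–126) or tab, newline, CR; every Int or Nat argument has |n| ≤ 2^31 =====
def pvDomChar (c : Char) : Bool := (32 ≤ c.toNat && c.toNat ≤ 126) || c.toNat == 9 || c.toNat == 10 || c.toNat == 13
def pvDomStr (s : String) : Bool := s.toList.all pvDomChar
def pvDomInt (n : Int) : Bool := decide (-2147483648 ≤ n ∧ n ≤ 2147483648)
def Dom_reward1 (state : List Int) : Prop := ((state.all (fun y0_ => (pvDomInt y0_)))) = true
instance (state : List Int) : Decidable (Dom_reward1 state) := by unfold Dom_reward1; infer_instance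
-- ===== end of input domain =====

-- B replaces A's branching accumulation loop by the closed combination -15*count(1) - 5*count(2) (simpler).


-- ===== PORT A =====
def reward1 (state : List Int) : Int :=
  state.foldl (fun reward i =>
    if i == 1 then reward + 5 * (-3)
    else if i == 2 then reward + 5 * (-1)
    else if i == 3 then reward + 0
    else reward) 0

-- ===== PORT B =====
def reward1_alt (state : List Int) : Int :=
  -15 * (PySem.List.count state 1 : Int) - 5 * (PySem.List.count state 2 : Int)

-- ===== PRECONDITION & SPEC =====
def Spec_reward1 (state : List Int) (out : Int) : Prop := out = reward1_alt state
instance (state : List Int) (out : Int) : Decidable (Spec_reward1 state out) := by unfold Spec_reward1; infer_instance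

-- ===== CLAIM (what is proved, stated in full; the proofs are below) =====
def Claim_equal_reward1 : Prop := ∀ (state : List Int), Dom_reward1 state → Spec_reward1 state (reward1 state)

-- ===== LEMMAS AND PROOFS =====
lemma reward1_foldl_acc (state : List Int) (a : Int) :
    state.foldl (fun reward i =>
      if i == 1 then reward + 5 * (-3)
      else if i == 2 then reward + 5 * (-1)
      else if i == 3 then reward + 0
      else reward) a
    = a + (-15 * (state.count 1 : Int) - 5 * (state.count 2 : Int)) := by
  induction state generalizing a with
  | nil => simp
  | cons x xs ih =>
    simp only [List.foldl_cons, ih, List.count_cons]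
    by_cases h1 : x = 1
    · simp [h1]; ring
    · by_cases h2 : x = 2
      · simp [h2]; push_cast; ring
      · by_cases h3 : x = 3
        · simp [h1, h2, h3]
        · simp [h1, h2, h3]

-- ===== VERDICT (by name: the statement is the Claim_ definition above) =====
theorem reward1_spec : Claim_equal_reward1 := by
  intro state _
  show _ = _
  rw [reward1_alt, reward1, reward1_foldl_acc]
  simp [PySem.List.count_eq]
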